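-- pv_equiv track=rewrite | github.com/petar-popovic-bg/Jerteh | Text/text.py | asc_to_lat
-- ===== SOURCE A (Python) =====
-- def asc_to_lat(text):
--     """
--     Converts ASCII text to sr-latin script.
--
--     :param text: string
--     :return: string
--     """
--     dic = {
--         'Dy': 'Dž',
--         'Lx': 'Lj',
--         'Nx': 'Nj',
--         'DY': 'DŽ',
--         'LX': 'LJ',
--         'NX': 'NJ',
--         'lx': 'lj',
--         'nx': 'nj',
--         'dy': 'dž',
--         'Cy': 'Č',
--         'Cx': 'Ć',
--         'Zx': 'Ž',
--         'Dx': 'Đ',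
--         'Sx': 'Š',
--         'cy': 'č',
--         'cx': 'ć',
--         'zx': 'ž',
--         'dx': 'đ',
--         'sx': 'š'
--     }
--     for key in dic.keys():
--         text = text.replace(key, dic[key])
--     return text
-- ===== SOURCE B (Python) =====
-- def asc_to_lat(text):
--     """
--     Converts ASCII text to sr-latin script.
--
--     :param text: string
--     :return: string
--     """
--     def sub(a, b):
--         # direct decision on the second character, then the first; no table
--         if b == 'y':
--             if a == 'D':
--                 return 'Dž'
--             if a == 'd':
--                 return 'dž'
--             if a == 'C':
--                 return 'Č'
--             if a == 'c':
--                 return 'č'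
--         elif b == 'x':
--             if a == 'L':
--                 return 'Lj'
--             if a == 'N':
--                 return 'Nj'
--             if a == 'l':
--                 return 'lj'
--             if a == 'n':
--                 return 'nj'
--             if a == 'C':
--                 return 'Ć'
--             if a == 'Z':
--                 return 'Ž'
--             if a == 'D':
--                 return 'Đ'
--             if a == 'S':
--                 return 'Š'
--             if a == 'c':
--                 return 'ć'
--             if a == 'z':
--                 return 'ž'
--             if a == 'd':
--                 return 'đ'
--             if a == 's':
--                 return 'š'
--         elif b == 'Y':
--             if a == 'D':
--                 return 'DŽ'
--         elif b == 'X':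
--             if a == 'L':
--                 return 'LJ'
--             if a == 'N':
--                 return 'NJ'
--         return None
--
--     out = []
--     i = 0
--     n = len(text)
--     while i < n:
--         r = sub(text[i], text[i + 1]) if i + 1 < n else None
--         if r is not None:
--             out.append(r)
--             i += 2
--         else:
--             out.append(text[i])
--             i += 1
--     return ''.join(out)
-- ===== Notes on version B (the rewrite author's own statement) =====
-- stated objective: alternative
-- what changed: Replaces A's 19 sequential whole-string replace passes (driven by a dict) with a single left-to-right scan with an index and output buffer that decides each 2-character window by a table-free nested if-chain on (second char, first char); equal because the 19 keys are pairwise distinct and no key's second character (x/y/X/Y) starts a key or occurs in any replacement.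
import Mathlib
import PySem

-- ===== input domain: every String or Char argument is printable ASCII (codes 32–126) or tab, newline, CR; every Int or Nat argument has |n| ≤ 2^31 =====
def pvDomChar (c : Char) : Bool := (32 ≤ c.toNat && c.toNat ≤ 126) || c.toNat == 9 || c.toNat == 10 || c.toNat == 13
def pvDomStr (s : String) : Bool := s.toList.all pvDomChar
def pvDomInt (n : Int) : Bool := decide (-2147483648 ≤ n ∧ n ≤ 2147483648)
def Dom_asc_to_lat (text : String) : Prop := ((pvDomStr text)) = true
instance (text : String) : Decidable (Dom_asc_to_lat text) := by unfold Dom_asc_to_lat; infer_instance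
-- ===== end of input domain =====

-- ===== PORT A =====
-- B replaces A's 19 dict-driven whole-string replace passes by one left-to-right scan
-- whose 2-character window is decided by a table-free nested if-chain (objective: alternative).
-- The digraph dict of the Python source A.
def pvDic : PySem.Dict String String := PySem.Dict.ofList [("Dy","Dž"),("Lx","Lj"),("Nx","Nj"),("DY","DŽ"),("LX","LJ"),("NX","NJ"),("lx","lj"),("nx","nj"),("dy","dž"),("Cy","Č"),("Cx","Ć"),("Zx","Ž"),("Dx","Đ"),("Sx","Š"),("cy","č"),("cx","ć"),("zx","ž"),("dx","đ"),("sx","š")]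

-- Port of A: for key in dic.keys(): text = text.replace(key, dic[key])
def asc_to_lat (text : String) : String :=
  pvDic.keys.foldl (fun t k => PySem.Str.replace t k (pvDic.getD k "")) text

-- ===== PORT B =====
-- Port of B's helper sub(a, b): nested if-chain on the second character, then the first.
def pvSub (a b : Char) : Option (List Char) :=
  if b = 'y' then
    if a = 'D' then some ['D','ž']
    else if a = 'd' then some ['d','ž']
    else if a = 'C' then some ['Č']
    else if a = 'c' then some ['č']
    else none
  else if b = 'x' then
    if a = 'L' then some ['L','j']
    else if a = 'N' then some ['N','j']
    else if a = 'l' then some ['l','j']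
    else if a = 'n' then some ['n','j']
    else if a = 'C' then some ['Ć']
    else if a = 'Z' then some ['Ž']
    else if a = 'D' then some ['Đ']
    else if a = 'S' then some ['Š']
    else if a = 'c' then some ['ć']
    else if a = 'z' then some ['ž']
    else if a = 'd' then some ['đ']
    else if a = 's' then some ['š']
    else none
  else if b = 'Y' then
    if a = 'D' then some ['D','Ž'] else none
  else if b = 'X' then
    if a = 'L' then some ['L','J']
    else if a = 'N' then some ['N','J']
    else none
  else none

-- Port of B's while loop: structural recursion on the remaining characters; at each step
-- sub is asked about the two-character window (emit replacement, advance 2) else emit one char.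
def pvAltGo : List Char → List Char
  | [] => []
  | [a] => [a]
  | a :: b :: t =>
    match pvSub a b with
    | some v => v ++ pvAltGo t
    | none => a :: pvAltGo (b :: t)

def asc_to_lat_alt (text : String) : String := String.ofList (pvAltGo text.toList)

-- ===== PRECONDITION & SPEC =====
def Spec_asc_to_lat (text : String) (out : String) : Prop := out = asc_to_lat_alt text
instance (text : String) (out : String) : Decidable (Spec_asc_to_lat text out) := by unfold Spec_asc_to_lat; infer_instance

-- ===== CLAIM (what is proved, stated in full; the proofs are below) =====
def Claim_equal_asc_to_lat : Prop := ∀ (text : String), Dom_asc_to_lat text → Spec_asc_to_lat text (asc_to_lat text)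

-- ===== LEMMAS AND PROOFS =====

-- The 19 digraph rules as (first char, second char, replacement chars), in dict order.
def pvK : List (Char × Char × List Char) := [
  ('D','y',['D','ž']),
  ('L','x',['L','j']),
  ('N','x',['N','j']),
  ('D','Y',['D','Ž']),
  ('L','X',['L','J']),
  ('N','X',['N','J']),
  ('l','x',['l','j']),
  ('n','x',['n','j']),
  ('d','y',['d','ž']),
  ('C','y',['Č']),
  ('C','x',['Ć']),
  ('Z','x',['Ž']),
  ('D','x',['Đ']),
  ('S','x',['Š']),
  ('c','y',['č']),
  ('c','x',['ć']),
  ('z','x',['ž']),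
  ('d','x',['đ']),
  ('s','x',['š'])]

-- One replace pass with a two-character pattern, as structural recursion.
def rep2 (k1 k2 : Char) (v : List Char) : List Char → List Char
  | [] => []
  | [c] => [c]
  | a :: b :: t => if a = k1 ∧ b = k2 then v ++ rep2 k1 k2 v t else a :: rep2 k1 k2 v (b :: t)

-- All passes of A in sequence.
def pvChain (ks : List (Char × Char × List Char)) (l : List Char) : List Char :=
  ks.foldl (fun t e => rep2 e.1 e.2.1 e.2.2 t) l

-- first characters of keys / second characters of keys
def isFirst (c : Char) : Bool := c ∈ (['C','D','L','N','S','Z','c','d','l','n','s','z'] : List Char)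
def isSecond (c : Char) : Bool := c ∈ (['X','Y','x','y'] : List Char)

def goodE (e : Char × Char × List Char) : Bool :=
  isFirst e.1 && isSecond e.2.1 && !e.2.2.isEmpty &&
    e.2.2.all (fun c => !isSecond c) && e.2.2.getLast?.all (fun c => !isFirst c)

lemma goodK : ∀ e ∈ pvK, goodE e = true := by decide

lemma first_not_second (c : Char) (h : isFirst c = true) : isSecond c = false := by
  simp [isFirst] at h
  rcases h with rfl|rfl|rfl|rfl|rfl|rfl|rfl|rfl|rfl|rfl|rfl|rfl <;> rfl

lemma goodE_first {e : Char × Char × List Char} (h : goodE e = true) : isFirst e.1 = true := by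
  simp [goodE] at h; exact h.1.1.1.1

lemma goodE_second {e : Char × Char × List Char} (h : goodE e = true) : isSecond e.2.1 = true := by
  simp [goodE] at h; exact h.1.1.1.2

lemma goodE_ne_nil {e : Char × Char × List Char} (h : goodE e = true) : e.2.2 ≠ [] := by
  simp [goodE] at h; exact h.1.1.2

lemma goodE_not_second {e : Char × Char × List Char} (h : goodE e = true) :
    ∀ c ∈ e.2.2, isSecond c = false := by
  simp [goodE] at h; exact h.1.2

lemma goodE_last {e : Char × Char × List Char} (h : goodE e = true) :
    ∀ c, e.2.2.getLast? = some c → isFirst c = false := by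
  intro c hc
  have h5 : e.2.2.getLast?.all (fun c => !isFirst c) = true := by
    simp only [goodE, Bool.and_eq_true] at h; exact h.2
  rw [hc] at h5; simpa using h5

-- PySem.Chars.replace with a 2-character pattern is rep2.
lemma go_spec (k1 k2 : Char) (v : List Char) :
    ∀ (fuel : Nat) (l acc : List Char), l.length ≤ fuel →
      PySem.Chars.replace.go [k1, k2] v fuel l acc = acc.reverse ++ rep2 k1 k2 v l := by
  intro fuel
  induction fuel with
  | zero =>
    intro l acc h
    have : l = [] := List.length_eq_zero_iff.mp (Nat.le_zero.mp h)
    subst this; simp [PySem.Chars.replace.go, rep2]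
  | succ n ih =>
    intro l acc h
    match l with
    | [] => simp [PySem.Chars.replace.go, rep2]
    | [c] =>
      rw [PySem.Chars.replace.go]
      have hp : List.isPrefixOf [k1, k2] [c] = false := by simp [List.isPrefixOf]
      simp [hp, rep2, ih [] (c :: acc) (by simp)]
    | a :: b :: t =>
      rw [PySem.Chars.replace.go]
      simp only [List.length_cons] at h
      by_cases hm : a = k1 ∧ b = k2
      · obtain ⟨rfl, rfl⟩ := hm
        simp [List.isPrefixOf, rep2, ih t _ (by omega)]
      · have hpre : List.isPrefixOf [k1, k2] (a :: b :: t) = false := by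
          simp [List.isPrefixOf]; tauto
        simp [hpre, rep2, hm, ih (b :: t) _ (by simp; omega)]

lemma replace_eq_rep2 (l : List Char) (k1 k2 : Char) (v : List Char) :
    PySem.Chars.replace l [k1, k2] v = rep2 k1 k2 v l := by
  simpa [PySem.Chars.replace] using go_spec k1 k2 v l.length l [] le_rfl

-- a pass skips a head that does not start a match
lemma rep2_cons_skip (k1 k2 : Char) (v : List Char) (a : Char) (l : List Char)
    (h : ¬(a = k1 ∧ l.head? = some k2)) :
    rep2 k1 k2 v (a :: l) = a :: rep2 k1 k2 v l := by
  cases l with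
  | nil => rfl
  | cons b t =>
    have : ¬(a = k1 ∧ b = k2) := by simpa using h
    simp [rep2, this]

-- the head of a pass output is the input head or the replacement head
lemma rep2_head (k1 k2 : Char) (v : List Char) (hv : v ≠ []) (l : List Char) :
    (rep2 k1 k2 v l).head? = l.head? ∨ (rep2 k1 k2 v l).head? = v.head? := by
  match l with
  | [] => left; rfl
  | [c] => left; rfl
  | a :: b :: t =>
    by_cases hm : a = k1 ∧ b = k2
    · right
      cases v with
      | nil => exact absurd rfl hv
      | cons x xs => simp [rep2, hm]
    · left; simp [rep2, hm]

-- a pass distributes over a prefix that contains no second-characters and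
-- whose last character is not a first-character
lemma rep2_append (k1 k2 : Char) (v : List Char)
    (hk1 : isFirst k1 = true) (hk2 : isSecond k2 = true) :
    ∀ (u l : List Char), (∀ c ∈ u, isSecond c = false) →
      (∀ c, u.getLast? = some c → isFirst c = false) →
      rep2 k1 k2 v (u ++ l) = u ++ rep2 k1 k2 v l := by
  intro u
  induction u with
  | nil => intro l _ _; rfl
  | cons c u' ih =>
    intro l hsec hlast
    have hskip : ¬(c = k1 ∧ (u' ++ l).head? = some k2) := by
      rintro ⟨rfl, hh⟩
      cases u' with
      | nil =>
        have : isFirst c = false := hlast c (by simp)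
        rw [hk1] at this; cases this
      | cons d u'' =>
        have hd : d = k2 := by simpa using hh
        have : isSecond d = false := hsec d (by simp)
        rw [hd, hk2] at this; cases this
    rw [List.cons_append, rep2_cons_skip _ _ _ _ _ hskip,
        ih l (fun x hx => hsec x (List.mem_cons_of_mem _ hx))
          (fun x hx => hlast x (by
            cases u' with
            | nil => simp at hx
            | cons d u'' => simpa [List.getLast?_cons_cons] using hx))]
    rfl

lemma chain_nil (ks : List (Char × Char × List Char)) : pvChain ks [] = [] := by
  induction ks with
  | nil => rfl
  | cons e ks ih => simpa [pvChain, rep2] using ih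

-- the chain skips a head that matches no key against the current head of the rest
lemma chain_skip : ∀ (ks : List (Char × Char × List Char)), (∀ e ∈ ks, goodE e = true) →
    ∀ (a : Char) (l : List Char), (∀ e ∈ ks, ¬(a = e.1 ∧ l.head? = some e.2.1)) →
      pvChain ks (a :: l) = a :: pvChain ks l := by
  intro ks
  induction ks with
  | nil => intro _ a l _; rfl
  | cons e ks ih =>
    intro hg a l h
    have hge := hg e (List.mem_cons_self)
    have h1 : pvChain (e :: ks) (a :: l) = pvChain ks (rep2 e.1 e.2.1 e.2.2 (a :: l)) := rfl
    rw [h1, rep2_cons_skip _ _ _ _ _ (h e List.mem_cons_self)]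
    rw [ih (fun e' he' => hg e' (List.mem_cons_of_mem _ he')) a _ ?_]
    · rfl
    · intro e' he'
      rintro ⟨rfl, hh⟩
      rcases rep2_head e.1 e.2.1 e.2.2 (goodE_ne_nil hge) l with hc | hc
      · exact h e' (List.mem_cons_of_mem _ he') ⟨rfl, hc ▸ hh⟩
      · rw [hc] at hh
        have hmem : e'.2.1 ∈ e.2.2 := by
          cases hv : e.2.2 with
          | nil => simp [hv] at hh
          | cons x xs => rw [hv] at hh; simp at hh; simp [← hh]
        have h2 : isSecond e'.2.1 = false := goodE_not_second hge _ hmem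
        rw [goodE_second (hg e' (List.mem_cons_of_mem _ he'))] at h2
        cases h2

-- the chain distributes over an emitted replacement
lemma chain_append : ∀ (ks : List (Char × Char × List Char)), (∀ e ∈ ks, goodE e = true) →
    ∀ (u : List Char), (∀ c ∈ u, isSecond c = false) →
    (∀ c, u.getLast? = some c → isFirst c = false) →
    ∀ l, pvChain ks (u ++ l) = u ++ pvChain ks l := by
  intro ks
  induction ks with
  | nil => intro _ u _ _ l; rfl
  | cons e ks ih =>
    intro hg u hu1 hu2 l
    have hge := hg e (List.mem_cons_self)
    have h1 : pvChain (e :: ks) (u ++ l) = pvChain ks (rep2 e.1 e.2.1 e.2.2 (u ++ l)) := rfl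
    rw [h1, rep2_append e.1 e.2.1 e.2.2 (goodE_first hge) (goodE_second hge) u l hu1 hu2,
        ih (fun e' he' => hg e' (List.mem_cons_of_mem _ he')) u hu1 hu2]
    rfl

-- a matching two-character window is replaced by its value, by the unique pass that owns it
lemma chain_match (P S : List (Char × Char × List Char)) (a b : Char) (v : List Char)
    (hgP : ∀ e ∈ P, goodE e = true) (hgS : ∀ e ∈ S, goodE e = true)
    (hge : goodE (a, b, v) = true)
    (hP : ∀ e ∈ P, ¬(a = e.1 ∧ b = e.2.1)) (t : List Char) :
    pvChain (P ++ (a, b, v) :: S) (a :: b :: t) = v ++ pvChain (P ++ (a, b, v) :: S) t := by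
  have hfold : ∀ m, pvChain (P ++ (a, b, v) :: S) m
      = pvChain S (rep2 a b v (pvChain P m)) := by
    intro m; simp [pvChain, List.foldl_append]
  rw [hfold, hfold]
  have hstep1 : pvChain P (a :: b :: t) = a :: b :: pvChain P t := by
    rw [chain_skip P hgP a (b :: t) (by
      intro e he hcc
      exact hP e he ⟨hcc.1, by simpa using hcc.2⟩)]
    rw [chain_skip P hgP b t (by
      intro e he hcc
      have h3 : isSecond b = true := goodE_second hge
      rw [hcc.1, first_not_second _ (goodE_first (hgP e he))] at h3
      cases h3)]
  rw [hstep1]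
  have hmatch : rep2 a b v (a :: b :: pvChain P t) = v ++ rep2 a b v (pvChain P t) := by
    simp [rep2]
  rw [hmatch,
      chain_append S hgS v (goodE_not_second hge) (goodE_last hge) (rep2 a b v (pvChain P t))]

-- B's if-chain lookup of a two-character window = first matching rule of pvK
set_option maxHeartbeats 2000000 in
lemma pvSub_eq_find (a b : Char) :
    pvSub a b = (pvK.find? (fun e => e.1 == a && e.2.1 == b)).map (fun e => e.2.2) := by
  by_cases h0 : ('D' == a && 'y' == b) = true
  · obtain ⟨rfl, rfl⟩ : 'D' = a ∧ 'y' = b := by simpa using h0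
    rfl
  by_cases h1 : ('L' == a && 'x' == b) = true
  · obtain ⟨rfl, rfl⟩ : 'L' = a ∧ 'x' = b := by simpa using h1
    rfl
  by_cases h2 : ('N' == a && 'x' == b) = true
  · obtain ⟨rfl, rfl⟩ : 'N' = a ∧ 'x' = b := by simpa using h2
    rfl
  by_cases h3 : ('D' == a && 'Y' == b) = true
  · obtain ⟨rfl, rfl⟩ : 'D' = a ∧ 'Y' = b := by simpa using h3
    rfl
  by_cases h4 : ('L' == a && 'X' == b) = true
  · obtain ⟨rfl, rfl⟩ : 'L' = a ∧ 'X' = b := by simpa using h4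
    rfl
  by_cases h5 : ('N' == a && 'X' == b) = true
  · obtain ⟨rfl, rfl⟩ : 'N' = a ∧ 'X' = b := by simpa using h5
    rfl
  by_cases h6 : ('l' == a && 'x' == b) = true
  · obtain ⟨rfl, rfl⟩ : 'l' = a ∧ 'x' = b := by simpa using h6
    rfl
  by_cases h7 : ('n' == a && 'x' == b) = true
  · obtain ⟨rfl, rfl⟩ : 'n' = a ∧ 'x' = b := by simpa using h7
    rfl
  by_cases h8 : ('d' == a && 'y' == b) = true
  · obtain ⟨rfl, rfl⟩ : 'd' = a ∧ 'y' = b := by simpa using h8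
    rfl
  by_cases h9 : ('C' == a && 'y' == b) = true
  · obtain ⟨rfl, rfl⟩ : 'C' = a ∧ 'y' = b := by simpa using h9
    rfl
  by_cases h10 : ('C' == a && 'x' == b) = true
  · obtain ⟨rfl, rfl⟩ : 'C' = a ∧ 'x' = b := by simpa using h10
    rfl
  by_cases h11 : ('Z' == a && 'x' == b) = true
  · obtain ⟨rfl, rfl⟩ : 'Z' = a ∧ 'x' = b := by simpa using h11
    rfl
  by_cases h12 : ('D' == a && 'x' == b) = true
  · obtain ⟨rfl, rfl⟩ : 'D' = a ∧ 'x' = b := by simpa using h12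
    rfl
  by_cases h13 : ('S' == a && 'x' == b) = true
  · obtain ⟨rfl, rfl⟩ : 'S' = a ∧ 'x' = b := by simpa using h13
    rfl
  by_cases h14 : ('c' == a && 'y' == b) = true
  · obtain ⟨rfl, rfl⟩ : 'c' = a ∧ 'y' = b := by simpa using h14
    rfl
  by_cases h15 : ('c' == a && 'x' == b) = true
  · obtain ⟨rfl, rfl⟩ : 'c' = a ∧ 'x' = b := by simpa using h15
    rfl
  by_cases h16 : ('z' == a && 'x' == b) = true
  · obtain ⟨rfl, rfl⟩ : 'z' = a ∧ 'x' = b := by simpa using h16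
    rfl
  by_cases h17 : ('d' == a && 'x' == b) = true
  · obtain ⟨rfl, rfl⟩ : 'd' = a ∧ 'x' = b := by simpa using h17
    rfl
  by_cases h18 : ('s' == a && 'x' == b) = true
  · obtain ⟨rfl, rfl⟩ : 's' = a ∧ 'x' = b := by simpa using h18
    rfl
  have hR : (pvK.find? (fun e => e.1 == a && e.2.1 == b)) = none := by
    simp only [pvK, List.find?]
    simp only [Bool.not_eq_true] at h0 h1 h2 h3 h4 h5 h6 h7 h8 h9 h10 h11 h12 h13 h14 h15 h16 h17 h18
    simp [h0, h1, h2, h3, h4, h5, h6, h7, h8, h9, h10, h11, h12, h13, h14, h15, h16, h17, h18]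
  rw [hR]
  simp only [Option.map_none]
  by_cases hy : b = 'y'
  · subst hy
    have d0 : ¬ a = 'D' := fun h => h0 (by subst h; decide)
    have d1 : ¬ a = 'd' := fun h => h8 (by subst h; decide)
    have d2 : ¬ a = 'C' := fun h => h9 (by subst h; decide)
    have d3 : ¬ a = 'c' := fun h => h14 (by subst h; decide)
    simp [pvSub, d0, d1, d2, d3]
  by_cases hx : b = 'x'
  · subst hx
    have d0 : ¬ a = 'L' := fun h => h1 (by subst h; decide)
    have d1 : ¬ a = 'N' := fun h => h2 (by subst h; decide)
    have d2 : ¬ a = 'l' := fun h => h6 (by subst h; decide)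
    have d3 : ¬ a = 'n' := fun h => h7 (by subst h; decide)
    have d4 : ¬ a = 'C' := fun h => h10 (by subst h; decide)
    have d5 : ¬ a = 'Z' := fun h => h11 (by subst h; decide)
    have d6 : ¬ a = 'D' := fun h => h12 (by subst h; decide)
    have d7 : ¬ a = 'S' := fun h => h13 (by subst h; decide)
    have d8 : ¬ a = 'c' := fun h => h15 (by subst h; decide)
    have d9 : ¬ a = 'z' := fun h => h16 (by subst h; decide)
    have d10 : ¬ a = 'd' := fun h => h17 (by subst h; decide)
    have d11 : ¬ a = 's' := fun h => h18 (by subst h; decide)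
    simp [pvSub, d0, d1, d2, d3, d4, d5, d6, d7, d8, d9, d10, d11]
  by_cases hY : b = 'Y'
  · subst hY
    have d0 : ¬ a = 'D' := fun h => h3 (by subst h; decide)
    simp [pvSub, d0]
  by_cases hX : b = 'X'
  · subst hX
    have d0 : ¬ a = 'L' := fun h => h4 (by subst h; decide)
    have d1 : ¬ a = 'N' := fun h => h5 (by subst h; decide)
    simp [pvSub, d0, d1]
  simp [pvSub, hy, hx, hY, hX]

-- the scan of B, phrased over pvK
lemma chain_eq_altGo : ∀ (n : Nat) (l : List Char), l.length ≤ n → pvChain pvK l = pvAltGo l := by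
  intro n
  induction n with
  | zero =>
    intro l h
    have : l = [] := List.length_eq_zero_iff.mp (Nat.le_zero.mp h)
    subst this; simpa [pvAltGo] using chain_nil pvK
  | succ n ih =>
    intro l h
    match l with
    | [] => simpa [pvAltGo] using chain_nil pvK
    | [a] =>
      rw [chain_skip pvK goodK a [] (by simp)]
      simpa [pvAltGo] using chain_nil pvK
    | a :: b :: t =>
      simp only [List.length_cons] at h
      rcases hA : pvSub a b with _ | v
      · have hA' := hA
        rw [pvSub_eq_find] at hA'
        have hfind : pvK.find? (fun e => e.1 == a && e.2.1 == b) = none :=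
          Option.map_eq_none_iff.mp hA'
        have hnone : ∀ e ∈ pvK, ¬(a = e.1 ∧ b = e.2.1) := by
          intro e he hc
          have := List.find?_eq_none.mp hfind e he
          simp [← hc.1, ← hc.2] at this
        rw [chain_skip pvK goodK a (b :: t) (by
          intro e he hc
          exact hnone e he ⟨hc.1, by simpa using hc.2⟩)]
        rw [ih (b :: t) (by simpa using h)]
        simp [pvAltGo, hA]
      · have hA' := hA
        rw [pvSub_eq_find] at hA'
        obtain ⟨e, hfind, hv⟩ := Option.map_eq_some_iff.mp hA'
        obtain ⟨hpred, P, S, hsplit, hprev⟩ := List.find?_eq_some_iff_append.mp hfind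
        have hab : e.1 = a ∧ e.2.1 = b := by simpa using hpred
        have he : e = (a, b, e.2.2) := by
          obtain ⟨e1, e2, e3⟩ := e
          simp at hab ⊢
          exact hab
        have hgood : ∀ x ∈ pvK, goodE x = true := goodK
        rw [hsplit] at hgood ⊢
        rw [he] at hgood ⊢
        rw [chain_match P S a b e.2.2
          (fun x hx => hgood x (by simp [hx]))
          (fun x hx => hgood x (by simp [hx]))
          (hgood (a, b, e.2.2) (by simp))
          (by
            intro x hx hc
            have := hprev x hx
            simp [← hc.1, ← hc.2] at this)
          t]
        rw [← he, ← hsplit]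
        rw [ih t (by omega)]
        simp [pvAltGo, hA, ← hv]

-- Port A equals the chain of rep2 passes.
set_option maxHeartbeats 2000000 in
lemma A_eq_chain (text : String) :
    asc_to_lat text = String.ofList (pvChain pvK text.toList) := by
  have hk : pvDic.keys = ["Dy","Lx","Nx","DY","LX","NX","lx","nx","dy","Cy","Cx","Zx","Dx","Sx","cy","cx","zx","dx","sx"] := by rfl
  have hstep : ∀ (s : String) (k1 k2 : Char) (v : List Char),
      PySem.Str.replace s (String.ofList [k1, k2]) (String.ofList v)
        = String.ofList (rep2 k1 k2 v s.toList) := by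
    intro s k1 k2 v
    simp [PySem.Str.replace, replace_eq_rep2]
  have hv0 : pvDic.getD "Dy" "" = "Dž" := rfl
  have hv1 : pvDic.getD "Lx" "" = "Lj" := rfl
  have hv2 : pvDic.getD "Nx" "" = "Nj" := rfl
  have hv3 : pvDic.getD "DY" "" = "DŽ" := rfl
  have hv4 : pvDic.getD "LX" "" = "LJ" := rfl
  have hv5 : pvDic.getD "NX" "" = "NJ" := rfl
  have hv6 : pvDic.getD "lx" "" = "lj" := rfl
  have hv7 : pvDic.getD "nx" "" = "nj" := rfl
  have hv8 : pvDic.getD "dy" "" = "dž" := rfl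
  have hv9 : pvDic.getD "Cy" "" = "Č" := rfl
  have hv10 : pvDic.getD "Cx" "" = "Ć" := rfl
  have hv11 : pvDic.getD "Zx" "" = "Ž" := rfl
  have hv12 : pvDic.getD "Dx" "" = "Đ" := rfl
  have hv13 : pvDic.getD "Sx" "" = "Š" := rfl
  have hv14 : pvDic.getD "cy" "" = "č" := rfl
  have hv15 : pvDic.getD "cx" "" = "ć" := rfl
  have hv16 : pvDic.getD "zx" "" = "ž" := rfl
  have hv17 : pvDic.getD "dx" "" = "đ" := rfl
  have hv18 : pvDic.getD "sx" "" = "š" := rfl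
  have hs0 : ("Dy" : String) = String.ofList ['D','y'] := rfl
  have ht0 : ("Dž" : String) = String.ofList ['D','ž'] := rfl
  have hs1 : ("Lx" : String) = String.ofList ['L','x'] := rfl
  have ht1 : ("Lj" : String) = String.ofList ['L','j'] := rfl
  have hs2 : ("Nx" : String) = String.ofList ['N','x'] := rfl
  have ht2 : ("Nj" : String) = String.ofList ['N','j'] := rfl
  have hs3 : ("DY" : String) = String.ofList ['D','Y'] := rfl
  have ht3 : ("DŽ" : String) = String.ofList ['D','Ž'] := rfl
  have hs4 : ("LX" : String) = String.ofList ['L','X'] := rfl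
  have ht4 : ("LJ" : String) = String.ofList ['L','J'] := rfl
  have hs5 : ("NX" : String) = String.ofList ['N','X'] := rfl
  have ht5 : ("NJ" : String) = String.ofList ['N','J'] := rfl
  have hs6 : ("lx" : String) = String.ofList ['l','x'] := rfl
  have ht6 : ("lj" : String) = String.ofList ['l','j'] := rfl
  have hs7 : ("nx" : String) = String.ofList ['n','x'] := rfl
  have ht7 : ("nj" : String) = String.ofList ['n','j'] := rfl
  have hs8 : ("dy" : String) = String.ofList ['d','y'] := rfl
  have ht8 : ("dž" : String) = String.ofList ['d','ž'] := rfl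
  have hs9 : ("Cy" : String) = String.ofList ['C','y'] := rfl
  have ht9 : ("Č" : String) = String.ofList ['Č'] := rfl
  have hs10 : ("Cx" : String) = String.ofList ['C','x'] := rfl
  have ht10 : ("Ć" : String) = String.ofList ['Ć'] := rfl
  have hs11 : ("Zx" : String) = String.ofList ['Z','x'] := rfl
  have ht11 : ("Ž" : String) = String.ofList ['Ž'] := rfl
  have hs12 : ("Dx" : String) = String.ofList ['D','x'] := rfl
  have ht12 : ("Đ" : String) = String.ofList ['Đ'] := rfl
  have hs13 : ("Sx" : String) = String.ofList ['S','x'] := rfl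
  have ht13 : ("Š" : String) = String.ofList ['Š'] := rfl
  have hs14 : ("cy" : String) = String.ofList ['c','y'] := rfl
  have ht14 : ("č" : String) = String.ofList ['č'] := rfl
  have hs15 : ("cx" : String) = String.ofList ['c','x'] := rfl
  have ht15 : ("ć" : String) = String.ofList ['ć'] := rfl
  have hs16 : ("zx" : String) = String.ofList ['z','x'] := rfl
  have ht16 : ("ž" : String) = String.ofList ['ž'] := rfl
  have hs17 : ("dx" : String) = String.ofList ['d','x'] := rfl
  have ht17 : ("đ" : String) = String.ofList ['đ'] := rfl
  have hs18 : ("sx" : String) = String.ofList ['s','x'] := rfl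
  have ht18 : ("š" : String) = String.ofList ['š'] := rfl
  simp only [asc_to_lat, hk, List.foldl]
  simp only [hv0, hv1, hv2, hv3, hv4, hv5, hv6, hv7, hv8, hv9, hv10, hv11, hv12, hv13, hv14, hv15, hv16, hv17, hv18]
  simp only [hs0, ht0, hs1, ht1, hs2, ht2, hs3, ht3, hs4, ht4, hs5, ht5, hs6, ht6, hs7, ht7, hs8, ht8, hs9, ht9, hs10, ht10, hs11, ht11, hs12, ht12, hs13, ht13, hs14, ht14, hs15, ht15, hs16, ht16, hs17, ht17, hs18, ht18]
  simp only [hstep, String.toList_ofList]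
  simp [pvChain, pvK, List.foldl]

-- ===== VERDICT (by name: the statement is the Claim_ definition above) =====
theorem asc_to_lat_spec : Claim_equal_asc_to_lat := by
  intro text _
  unfold Spec_asc_to_lat asc_to_lat_alt
  rw [A_eq_chain, chain_eq_altGo text.toList.length text.toList le_rfl]
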